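-- pv_equiv track=rewrite | github.com/Yawn-Sean/Daily_CF_Problems | daily_problems/2025/09/0927/personal_submission/cf106032j_liryc.py | solve
-- ===== SOURCE A (Python) =====
-- def solve(n: int, m: int, q: int, a: list[int], qa: list[int]) -> list[int]:
--     cn = [0] * (m + 1)
--     for x in a:
--         cn[x] += 1
--     nt = [0] * (m + 1)
--     stk = []
--     for j in range(m << 1):
--         i = (j % m) + 1
--         if cn[i] & 1:
--             while stk:
--                 k = stk.pop()
--                 nt[k] = i
--         elif cn[i] and not nt[i]:
--             stk.append(i)
--     nShift = 0
--     ans = []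
--     for r in qa:
--         if r < 0:
--             nShift += 1
--         else:
--             x = a[r]
--             if cn[x] & 1:
--                 ans.append(x)
--             else:
--                 stop = False
--                 if nt[x] > 0:
--                     d = (nt[x] - x) % m
--                     if nShift >= d:
--                         stop = True
--                 if stop:
--                     ans.append(nt[x])
--                 else:
--                     ans.append((x - 1 + nShift) % m + 1)
--     return ans
-- ===== SOURCE B (Python) =====
-- def solve(n: int, m: int, q: int, a: list[int], qa: list[int]) -> list[int]:
--     cn = [0] * (m + 1)
--     for x in a:
--         cn[x] += 1
--     # positions 1..m holding an odd count, ascending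
--     odds = [i for i in range(1, m + 1) if cn[i] & 1]
--     nt = [0] * (m + 1)
--     if odds:
--         # one backward cyclic pass: nt[i] = smallest odd position > i, wrapping to odds[0]
--         nxt = odds[0]
--         for i in range(m, 0, -1):
--             if cn[i] & 1:
--                 nxt = i
--             elif cn[i]:
--                 nt[i] = nxt
--     def answer(x, s):
--         if cn[x] & 1:
--             return x
--         t = nt[x]
--         if t and (t - x) % m <= s:
--             return t
--         return (x - 1 + s) % m + 1
--     ans = []
--     s = 0
--     for r in qa:
--         if r < 0:
--             s += 1
--         else:
--             ans.append(answer(a[r], s))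
--     return ans
-- ===== Notes on version B (the rewrite author's own statement) =====
-- stated objective: simpler
-- what changed: B replaces A's 2m-step wrap-around stack sweep that fills the next-odd table with a direct computation: collect the odd-count positions once, then fill the table in a single backward pass over 1..m tracking the cyclically next odd position; the query phase is refactored into a small answer() helper with early returns instead of A's stop-flag logic.
-- outside the precondition, e.g. on solve(1, 0, 1, [0], [0]): A returns [0], B returns [0]
import Mathlib
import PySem

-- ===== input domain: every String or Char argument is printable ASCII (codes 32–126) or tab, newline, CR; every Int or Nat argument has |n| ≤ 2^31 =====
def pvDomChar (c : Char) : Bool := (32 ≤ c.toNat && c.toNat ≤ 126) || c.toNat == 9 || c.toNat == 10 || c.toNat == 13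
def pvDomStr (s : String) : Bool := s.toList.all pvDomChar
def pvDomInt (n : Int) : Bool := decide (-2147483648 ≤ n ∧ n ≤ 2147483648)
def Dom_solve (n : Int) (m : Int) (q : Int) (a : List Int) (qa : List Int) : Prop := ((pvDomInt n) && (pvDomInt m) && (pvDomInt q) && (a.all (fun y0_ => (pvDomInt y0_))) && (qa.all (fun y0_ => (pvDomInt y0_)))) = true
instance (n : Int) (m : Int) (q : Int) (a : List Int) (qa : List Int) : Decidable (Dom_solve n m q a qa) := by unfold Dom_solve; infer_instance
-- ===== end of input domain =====

-- B replaces A's 2m-step wrap-around stack sweep filling the next-odd table by one backward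
-- cyclic pass over 1..m (objective: simpler); return values agree on all of Pre_.

-- ===== PORT A =====
-- the Python 'while stk: k = stk.pop(); nt[k] = i' loop; the stack is kept head-as-top
-- (Python appends/pops at the tail), so pop = take the head
def popAll (nt : List Int) (stk : List Int) (i : Int) : List Int :=
  match stk with
  | [] => nt
  | k :: rest => popAll (PySem.List.pySetD nt k i) rest i

def solve (n : Int) (m : Int) (q : Int) (a : List Int) (qa : List Int) : List Int :=
  let cn := a.foldl (fun cn x => PySem.List.pySetD cn x (PySem.List.pyGetD cn x 0 + 1))
      (List.replicate (m + 1).toNat 0)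
  let p := (PySem.List.pyRange 0 (m <<< (1 : Nat)) 1).foldl (fun (s : List Int × List Int) j =>
      let i := PySem.Int.mod j m + 1
      if PySem.Int.band (PySem.List.pyGetD cn i 0) 1 == 1 then (popAll s.1 s.2 i, [])
      else if PySem.List.pyGetD cn i 0 != 0 && PySem.List.pyGetD s.1 i 0 == 0 then (s.1, i :: s.2)
      else s) (List.replicate (m + 1).toNat 0, [])
  let nt := p.1
  (qa.foldl (fun (s : Int × List Int) r =>
      if r < 0 then (s.1 + 1, s.2)
      else
        let x := PySem.List.pyGetD a r 0
        if PySem.Int.band (PySem.List.pyGetD cn x 0) 1 == 1 then (s.1, s.2 ++ [x])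
        else
          let ntx := PySem.List.pyGetD nt x 0
          let stop := if 0 < ntx then decide (PySem.Int.mod (ntx - x) m ≤ s.1) else false
          if stop then (s.1, s.2 ++ [ntx])
          else (s.1, s.2 ++ [PySem.Int.mod (x - 1 + s.1) m + 1])) ((0 : Int), ([] : List Int))).2

-- ===== PORT B =====
-- Source B's answer(x, s) helper (early-return chain)
def answerB (cn nt : List Int) (m x s : Int) : Int :=
  if PySem.Int.band (PySem.List.pyGetD cn x 0) 1 == 1 then x
  else
    let t := PySem.List.pyGetD nt x 0
    if t != 0 && decide (PySem.Int.mod (t - x) m ≤ s) then t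
    else PySem.Int.mod (x - 1 + s) m + 1

def solve_alt (n : Int) (m : Int) (q : Int) (a : List Int) (qa : List Int) : List Int :=
  let cn := a.foldl (fun cn x => PySem.List.pySetD cn x (PySem.List.pyGetD cn x 0 + 1))
      (List.replicate (m + 1).toNat 0)
  let odds := (PySem.List.pyRange 1 (m + 1) 1).filter
      (fun i => PySem.Int.band (PySem.List.pyGetD cn i 0) 1 == 1)
  let nt0 : List Int := List.replicate (m + 1).toNat 0
  let nt := if odds.isEmpty then nt0
    else ((PySem.List.pyRange m 0 (-1)).foldl (fun (s : List Int × Int) i =>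
        if PySem.Int.band (PySem.List.pyGetD cn i 0) 1 == 1 then (s.1, i)
        else if PySem.List.pyGetD cn i 0 != 0 then (PySem.List.pySetD s.1 i s.2, s.2)
        else s) (nt0, PySem.List.pyGetD odds 0 0)).1
  (qa.foldl (fun (s : Int × List Int) r =>
      if r < 0 then (s.1 + 1, s.2)
      else (s.1, s.2 ++ [answerB cn nt m (PySem.List.pyGetD a r 0) s.1]))
      ((0 : Int), ([] : List Int))).2

-- ===== PRECONDITION & SPEC =====
-- Pre_ excludes exactly the inputs where Python A raises (an element of a outside the index
-- range of the count array -> IndexError, a query index ≥ len(a) -> IndexError); its last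
-- clause (a non-negative query forces m ≥ 1) also drops the degenerate m = 0 inputs whose
-- queried counts all happen to be odd — A returns there and B agrees, but on any even count
-- A computes % m and raises ZeroDivisionError, so m = 0 with queries is excluded wholesale.
def Pre_solve (n : Int) (m : Int) (q : Int) (a : List Int) (qa : List Int) : Prop :=
  (∀ x ∈ a, -(m + 1) ≤ x ∧ x ≤ m) ∧ (∀ r ∈ qa, r < (a.length : Int)) ∧
    ((∃ r ∈ qa, 0 ≤ r) → 1 ≤ m)
instance (n : Int) (m : Int) (q : Int) (a : List Int) (qa : List Int) : Decidable (Pre_solve n m q a qa) := by unfold Pre_solve; infer_instance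

def pvWitness_solve : Int × Int × Int × List Int × List Int := (3, 3, 3, [1, 2, 2], [0, -1, 1, 2])

def Spec_solve (n : Int) (m : Int) (q : Int) (a : List Int) (qa : List Int) (out : List Int) : Prop := out = solve_alt n m q a qa
instance (n : Int) (m : Int) (q : Int) (a : List Int) (qa : List Int) (out : List Int) : Decidable (Spec_solve n m q a qa out) := by unfold Spec_solve; infer_instance

-- ===== CLAIM (what is proved, stated in full; the proofs are below) =====
def Claim_equal_solve : Prop := ∀ (n : Int) (m : Int) (q : Int) (a : List Int) (qa : List Int), Dom_solve n m q a qa → Pre_solve n m q a qa → Spec_solve n m q a qa (solve n m q a qa)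

-- ===== LEMMAS AND PROOFS =====

-- the common count array
def cnF (m : Int) (a : List Int) : List Int :=
  a.foldl (fun cn x => PySem.List.pySetD cn x (PySem.List.pyGetD cn x 0 + 1))
    (List.replicate (m + 1).toNat 0)

def isOddP (cn : List Int) (i : Int) : Bool := PySem.Int.band (PySem.List.pyGetD cn i 0) 1 == 1
def isEvP (cn : List Int) (i : Int) : Bool := !isOddP cn i && (PySem.List.pyGetD cn i 0 != 0)

def oddsL (cn : List Int) (m : Int) : List Int :=
  (PySem.List.pyRange 1 (m + 1) 1).filter
    (fun i => PySem.Int.band (PySem.List.pyGetD cn i 0) 1 == 1)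

-- smallest odd position strictly greater than k, wrapping to the overall smallest
def nextOdd (cn : List Int) (m k : Int) : Int :=
  ((oddsL cn m).filter (fun o => decide (k < o))).headD ((oddsL cn m).headD 0)

def ntFspec (cn : List Int) (m k : Int) : Int :=
  if 1 ≤ k ∧ isEvP cn k = true ∧ oddsL cn m ≠ [] then nextOdd cn m k else 0

def ntF (cn : List Int) (m : Int) : List Int :=
  (List.range (m + 1).toNat).map (fun (k : Nat) => ntFspec cn m (k : Int))

-- A's nt computation, and its loop body with the position i as direct argument
def ntA (cn : List Int) (m : Int) : List Int :=
  ((PySem.List.pyRange 0 (m <<< (1 : Nat)) 1).foldl (fun (s : List Int × List Int) j =>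
      let i := PySem.Int.mod j m + 1
      if PySem.Int.band (PySem.List.pyGetD cn i 0) 1 == 1 then (popAll s.1 s.2 i, [])
      else if PySem.List.pyGetD cn i 0 != 0 && PySem.List.pyGetD s.1 i 0 == 0 then (s.1, i :: s.2)
      else s) (List.replicate (m + 1).toNat 0, [])).1

def stepAt (cn : List Int) (s : List Int × List Int) (i : Int) : List Int × List Int :=
  if PySem.Int.band (PySem.List.pyGetD cn i 0) 1 == 1 then (popAll s.1 s.2 i, [])
  else if PySem.List.pyGetD cn i 0 != 0 && PySem.List.pyGetD s.1 i 0 == 0 then (s.1, i :: s.2)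
  else s

def passFold (cn : List Int) (t : Nat) (s : List Int × List Int) : List Int × List Int :=
  (List.range t).foldl (fun s (k : Nat) => stepAt cn s ((k : Int) + 1)) s

-- B's nt computation
def ntB (cn : List Int) (m : Int) : List Int :=
  if (oddsL cn m).isEmpty then List.replicate (m + 1).toNat 0
  else ((PySem.List.pyRange m 0 (-1)).foldl (fun (s : List Int × Int) i =>
      if PySem.Int.band (PySem.List.pyGetD cn i 0) 1 == 1 then (s.1, i)
      else if PySem.List.pyGetD cn i 0 != 0 then (PySem.List.pySetD s.1 i s.2, s.2)
      else s) (List.replicate (m + 1).toNat 0, PySem.List.pyGetD (oddsL cn m) 0 0)).1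

-- invariant state descriptions for A's sweep
def hasOddB (cn : List Int) (m k t : Int) : Bool :=
  (oddsL cn m).any (fun o => decide (k < o) && decide (o ≤ t))

def nt1 (cn : List Int) (m : Int) (t : Nat) : List Int :=
  (List.range (m.toNat + 1)).map (fun (k : Nat) =>
    if 1 ≤ (k : Int) ∧ isEvP cn (k : Int) = true ∧ hasOddB cn m (k : Int) (t : Int) = true
    then nextOdd cn m (k : Int) else 0)

def stk1 (cn : List Int) (m : Int) (t : Nat) : List Int :=
  ((PySem.List.pyRange 1 ((t : Int) + 1) 1).filter
    (fun i => isEvP cn i && !hasOddB cn m i (t : Int))).reverse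

-- ---------- small facts ----------

lemma mem_oddsL {cn : List Int} {m o : Int} :
    o ∈ oddsL cn m ↔ 1 ≤ o ∧ o ≤ m ∧ isOddP cn o = true := by
  simp only [oddsL, List.mem_filter, PySem.List.mem_pyRange_one, isOddP, beq_iff_eq]
  constructor
  · rintro ⟨⟨h1, h2⟩, h3⟩; exact ⟨h1, by omega, by simpa using h3⟩
  · rintro ⟨h1, h2, h3⟩; exact ⟨⟨h1, by omega⟩, by simpa using h3⟩

lemma oddsL_sorted (cn : List Int) (m : Int) : (oddsL cn m).Pairwise (· < ·) := by
  exact List.Pairwise.filter _ (PySem.List.pairwise_lt_pyRange_one 1 (m+1))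

lemma headD_filter_min {l : List Int} (hs : l.Pairwise (· < ·)) {p : Int → Bool} {x d : Int}
    (hx : x ∈ l) (hpx : p x = true) (hmin : ∀ y ∈ l, p y = true → x ≤ y) :
    (l.filter p).headD d = x := by
  induction l with
  | nil => cases hx
  | cons y tl ih =>
    rcases List.pairwise_cons.1 hs with ⟨hy, htl⟩
    by_cases hpy : p y = true
    · have hxy : x ≤ y := hmin y (List.mem_cons_self) hpy
      have : x = y := by
        rcases List.mem_cons.1 hx with h | h
        · exact h
        · exact absurd (hy x h) (by omega)
      simp [hpy, this]
    · have hx' : x ∈ tl := by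
        rcases List.mem_cons.1 hx with h | h
        · exact absurd hpx (by simp [h, hpy])
        · exact h
      simpa [List.filter_cons, hpy] using ih htl hx' (fun y hy' => hmin y (List.mem_cons_of_mem _ hy'))

lemma nextOdd_mem {cn : List Int} {m : Int} (hne : oddsL cn m ≠ []) (k : Int) :
    nextOdd cn m k ∈ oddsL cn m := by
  unfold nextOdd
  cases hf : (oddsL cn m).filter (fun o => decide (k < o)) with
  | nil =>
    simp only [List.headD_nil]
    rcases List.exists_cons_of_ne_nil hne with ⟨h, t, he⟩
    simp [he]
  | cons z zs =>
    have : z ∈ (oddsL cn m).filter (fun o => decide (k < o)) := by simp [hf]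
    simpa using (List.mem_filter.1 this).1

lemma nextOdd_pos {cn : List Int} {m : Int} (hne : oddsL cn m ≠ []) (k : Int) :
    1 ≤ nextOdd cn m k := (mem_oddsL.1 (nextOdd_mem hne k)).1

lemma nextOdd_eq {cn : List Int} {m k x : Int} (hx : x ∈ oddsL cn m) (hkx : k < x)
    (hmin : ∀ o ∈ oddsL cn m, k < o → x ≤ o) : nextOdd cn m k = x := by
  unfold nextOdd
  exact headD_filter_min (oddsL_sorted cn m) hx (by simpa using hkx)
    (fun y hy hp => hmin y hy (by simpa using hp))

lemma nextOdd_wrap {cn : List Int} {m k : Int} (hno : ∀ o ∈ oddsL cn m, ¬(k < o)) :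
    nextOdd cn m k = (oddsL cn m).headD 0 := by
  unfold nextOdd
  have : (oddsL cn m).filter (fun o => decide (k < o)) = [] := by
    simp only [List.filter_eq_nil_iff]
    intro o ho; simpa using hno o ho
  simp [this]

lemma nextOdd_pred {cn : List Int} {m i : Int} (hi : i ∉ oddsL cn m) :
    nextOdd cn m (i - 1) = nextOdd cn m i := by
  unfold nextOdd
  congr 1
  apply List.filter_congr
  intro o ho
  have : o ≠ i := fun h => hi (h ▸ ho)
  simp; omega

lemma headD_min {cn : List Int} {m o : Int} (ho : o ∈ oddsL cn m) :
    (oddsL cn m).headD 0 ≤ o := by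
  have hs := oddsL_sorted cn m
  cases h : oddsL cn m with
  | nil => simp [h] at ho
  | cons z zs =>
    rw [h] at ho hs
    rcases List.mem_cons.1 ho with rfl | hm
    · simp
    · have := (List.pairwise_cons.1 hs).1 o hm
      simp; omega

lemma headD_mem {cn : List Int} {m : Int} (hne : oddsL cn m ≠ []) :
    (oddsL cn m).headD 0 ∈ oddsL cn m := by
  rcases List.exists_cons_of_ne_nil hne with ⟨h, t, he⟩
  simp [he]

-- accessors for map-over-range lists
lemma pyGetD_map_range (f : Nat → Int) {n : Nat} {i : Int} (h0 : 0 ≤ i) (h1 : i < (n : Int)) :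
    PySem.List.pyGetD ((List.range n).map f) i 0 = f i.toNat := by
  rw [PySem.List.pyGetD_eq_getElem _ _ h0 (by simpa using h1)]
  simp [List.getElem_map, List.getElem_range]

lemma pySetD_map_range (f : Nat → Int) {n : Nat} {i : Int} (v : Int) (h0 : 0 ≤ i) :
    PySem.List.pySetD ((List.range n).map f) i v
      = (List.range n).map (fun (k : Nat) => if (k : Int) = i then v else f k) := by
  rw [PySem.List.pySetD_of_nonneg _ _ h0]
  apply List.ext_getElem (by simp)
  intro j hj hj'
  simp only [List.getElem_set, List.getElem_map, List.getElem_range]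
  simp only [List.length_set, List.length_map, List.length_range] at hj
  by_cases h : i.toNat = j
  · simp [h, show ((j : Int) = i) from by omega]
  · simp [h, show ¬((j : Int) = i) from by omega]

lemma zeros_map_range (n : Nat) (f : Nat → Int) (h : ∀ k, k < n → f k = 0) :
    (List.range n).map f = List.replicate n 0 := by
  apply List.ext_getElem (by simp)
  intro j hj hj'
  simp only [List.getElem_map, List.getElem_range, List.getElem_replicate]
  exact h j (by simpa using hj)

lemma popAll_length (nt stk : List Int) (i : Int) : (popAll nt stk i).length = nt.length := by
  induction stk generalizing nt with
  | nil => rfl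
  | cons k rest ih => simp [popAll, ih, PySem.List.length_pySetD]

lemma popAll_getElem (nt stk : List Int) (i : Int) (hk : ∀ k ∈ stk, 0 ≤ k)
    (j : Nat) (hj : j < nt.length) :
    (popAll nt stk i)[j]'(by rw [popAll_length]; exact hj)
      = if ((j : Nat) : Int) ∈ stk then i else nt[j] := by
  induction stk generalizing nt with
  | nil => simp [popAll]
  | cons k rest ih =>
    have hk0 : 0 ≤ k := hk k List.mem_cons_self
    have hlen : (PySem.List.pySetD nt k i).length = nt.length := PySem.List.length_pySetD _ _ _
    show (popAll (PySem.List.pySetD nt k i) rest i)[j]'(by rw [popAll_length, PySem.List.length_pySetD]; exact hj) = _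
    rw [ih (PySem.List.pySetD nt k i) (fun k' h => hk k' (List.mem_cons_of_mem _ h)) (by rw [hlen]; exact hj)]
    by_cases hm : ((j : Nat) : Int) ∈ rest
    · simp [hm]
    · simp only [if_neg hm, PySem.List.pySetD_of_nonneg _ _ hk0, List.getElem_set]
      by_cases he : (j : Int) = k
      · simp [show k.toNat = j from by omega, List.mem_cons, he]
      · simp [show ¬(k.toNat = j) from by omega, List.mem_cons, he, hm]

-- ---------- more small facts ----------

lemma isOdd_mem_oddsL {cn : List Int} {m i : Int} (h1 : 1 ≤ i) (h2 : i ≤ m)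
    (h : isOddP cn i = true) : i ∈ oddsL cn m := mem_oddsL.2 ⟨h1, h2, h⟩

lemma not_isOddP_of_not_mem {cn : List Int} {m i : Int} (h1 : 1 ≤ i) (h2 : i ≤ m)
    (h : i ∉ oddsL cn m) : isOddP cn i = false := by
  by_contra hc
  exact h (isOdd_mem_oddsL h1 h2 (by simpa using hc))

lemma hasOddB_iff {cn : List Int} {m k t : Int} :
    hasOddB cn m k t = true ↔ ∃ o ∈ oddsL cn m, k < o ∧ o ≤ t := by
  simp [hasOddB, List.any_eq_true]

lemma hasOddB_zero (cn : List Int) (m k : Int) : hasOddB cn m k 0 = false := by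
  rw [Bool.eq_false_iff]
  intro h
  rcases hasOddB_iff.1 h with ⟨o, ho, h1, h2⟩
  have := (mem_oddsL.1 ho).1
  omega

lemma hasOddB_succ_odd {cn : List Int} {m t : Int} (hodd : (t + 1) ∈ oddsL cn m) (k : Int) :
    hasOddB cn m k (t + 1) = (hasOddB cn m k t || decide (k < t + 1)) := by
  by_cases h : hasOddB cn m k (t + 1) = true
  · rcases hasOddB_iff.1 h with ⟨o, ho, h1, h2⟩
    rw [h]
    by_cases h3 : o ≤ t
    · rw [hasOddB_iff.2 ⟨o, ho, h1, h3⟩]; rfl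
    · have : o = t + 1 := by omega
      simp [show k < t + 1 from by omega]
  · rw [Bool.eq_false_iff.2 h, eq_comm, Bool.or_eq_false_iff]
    constructor
    · rw [Bool.eq_false_iff]
      intro hc
      rcases hasOddB_iff.1 hc with ⟨o, ho, h1, h2⟩
      exact h (hasOddB_iff.2 ⟨o, ho, h1, by omega⟩)
    · simp only [decide_eq_false_iff_not]
      intro hc
      exact h (hasOddB_iff.2 ⟨t + 1, hodd, hc, le_refl _⟩)

lemma hasOddB_succ_notodd {cn : List Int} {m t : Int} (hodd : (t + 1) ∉ oddsL cn m) (k : Int) :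
    hasOddB cn m k (t + 1) = hasOddB cn m k t := by
  by_cases h : hasOddB cn m k (t + 1) = true
  · rcases hasOddB_iff.1 h with ⟨o, ho, h1, h2⟩
    have : o ≠ t + 1 := fun he => hodd (he ▸ ho)
    rw [h, eq_comm, hasOddB_iff.2 ⟨o, ho, h1, by omega⟩]
  · rw [Bool.eq_false_iff.2 h, eq_comm, Bool.eq_false_iff]
    intro hc
    rcases hasOddB_iff.1 hc with ⟨o, ho, h1, h2⟩
    exact h (hasOddB_iff.2 ⟨o, ho, h1, by omega⟩)

lemma mem_stk1 {cn : List Int} {m : Int} {t : Nat} {i : Int} :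
    i ∈ stk1 cn m t ↔
      1 ≤ i ∧ i ≤ (t : Int) ∧ isEvP cn i = true ∧ hasOddB cn m i (t : Int) = false := by
  simp only [stk1, List.mem_reverse, List.mem_filter, PySem.List.mem_pyRange_one,
    Bool.and_eq_true, Bool.not_eq_eq_eq_not, Bool.not_true]
  constructor
  · rintro ⟨⟨h1, h2⟩, h3, h4⟩; exact ⟨h1, by omega, h3, h4⟩
  · rintro ⟨h1, h2, h3, h4⟩; exact ⟨⟨h1, by omega⟩, h3, h4⟩

lemma nt1_length (cn : List Int) (m : Int) (t : Nat) : (nt1 cn m t).length = m.toNat + 1 := by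
  simp [nt1]

lemma nt1_getElem (cn : List Int) (m : Int) (t : Nat) (j : Nat) (hj : j < m.toNat + 1) :
    (nt1 cn m t)[j]'(by rw [nt1_length]; exact hj)
      = if 1 ≤ (j : Int) ∧ isEvP cn (j : Int) = true ∧ hasOddB cn m (j : Int) (t : Int) = true
        then nextOdd cn m (j : Int) else 0 := by
  simp [nt1]

lemma nt1_pyGetD (cn : List Int) (m : Int) (t : Nat) {i : Int} (h0 : 0 ≤ i)
    (h1 : i < (m.toNat : Int) + 1) :
    PySem.List.pyGetD (nt1 cn m t) i 0
      = if 1 ≤ i ∧ isEvP cn i = true ∧ hasOddB cn m i (t : Int) = true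
        then nextOdd cn m i else 0 := by
  unfold nt1
  rw [pyGetD_map_range _ h0 (by omega)]
  rw [show ((i.toNat : Nat) : Int) = i from by omega]

lemma ntF_length (cn : List Int) (m : Int) : (ntF cn m).length = (m + 1).toNat := by
  simp [ntF]

lemma ntF_getElem (cn : List Int) (m : Int) (j : Nat) (hj : j < (m + 1).toNat) :
    (ntF cn m)[j]'(by rw [ntF_length]; exact hj) = ntFspec cn m (j : Int) := by
  simp [ntF]

lemma ntF_pyGetD (cn : List Int) (m : Int) {i : Int} (h0 : 0 ≤ i) (h1 : i < ((m + 1).toNat : Int)) :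
    PySem.List.pyGetD (ntF cn m) i 0 = ntFspec cn m i := by
  unfold ntF
  rw [pyGetD_map_range _ h0 (by omega)]
  rw [show ((i.toNat : Nat) : Int) = i from by omega]

lemma passFold_succ (cn : List Int) (t : Nat) (s : List Int × List Int) :
    passFold cn (t + 1) s = stepAt cn (passFold cn t s) ((t : Int) + 1) := by
  unfold passFold
  rw [List.range_succ, List.foldl_append]
  rfl

-- ---------- phase 1 of A's sweep ----------

lemma stepAt_odd {cn : List Int} {i : Int} (s : List Int × List Int) (h : isOddP cn i = true) :
    stepAt cn s i = (popAll s.1 s.2 i, []) := by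
  unfold stepAt
  unfold isOddP at h
  rw [if_pos h]

lemma stepAt_ev {cn : List Int} {i : Int} (s : List Int × List Int) (h : isOddP cn i = false)
    (h2 : PySem.List.pyGetD cn i 0 ≠ 0) (h3 : PySem.List.pyGetD s.1 i 0 = 0) :
    stepAt cn s i = (s.1, i :: s.2) := by
  unfold stepAt
  unfold isOddP at h
  rw [if_neg (by simp [h]), if_pos (by simp [h2, h3])]

lemma stepAt_skip {cn : List Int} {i : Int} (s : List Int × List Int) (h : isOddP cn i = false)
    (h2 : PySem.List.pyGetD cn i 0 = 0 ∨ PySem.List.pyGetD s.1 i 0 ≠ 0) :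
    stepAt cn s i = s := by
  unfold stepAt
  unfold isOddP at h
  rw [if_neg (by simp [h]), if_neg]
  rcases h2 with h2 | h2 <;> simp [h2]

lemma stk1_succ (cn : List Int) (m : Int) (t : Nat) :
    stk1 cn m (t + 1)
      = (if isEvP cn ((t : Int) + 1) && !hasOddB cn m ((t : Int) + 1) ((t : Int) + 1)
          then [(t : Int) + 1] else [])
        ++ ((PySem.List.pyRange 1 ((t : Int) + 1) 1).filter
             (fun i => isEvP cn i && !hasOddB cn m i ((t : Int) + 1))).reverse := by
  unfold stk1
  have hc : ((t + 1 : Nat) : Int) = (t : Int) + 1 := by push_cast; ring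
  rw [hc, PySem.List.pyRange_one_succ_right (by omega : (1 : Int) ≤ (t : Int) + 1),
    List.filter_append, List.reverse_append]
  congr 1
  by_cases hp : (isEvP cn ((t : Int) + 1) && !hasOddB cn m ((t : Int) + 1) ((t : Int) + 1)) = true
  · simp [hp]
  · simp [hp]

lemma phase1 (cn : List Int) (m : Int) (hm : 0 < m) :
    ∀ t : Nat, (t : Int) ≤ m →
      passFold cn t (List.replicate (m.toNat + 1) 0, []) = (nt1 cn m t, stk1 cn m t) := by
  intro t
  induction t with
  | zero =>
    intro _
    unfold passFold
    simp only [List.range_zero, List.foldl_nil]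
    refine Prod.ext ?_ ?_
    · show List.replicate (m.toNat + 1) 0 = nt1 cn m 0
      unfold nt1
      refine (zeros_map_range _ _ ?_).symm
      intro k _
      rw [if_neg]
      rintro ⟨-, -, hc⟩
      rw [show ((0 : Nat) : Int) = 0 from rfl, hasOddB_zero] at hc
      cases hc
    · show ([] : List Int) = stk1 cn m 0
      unfold stk1
      rw [show ((0 : Nat) : Int) + 1 = 1 from by omega, PySem.List.pyRange_one_eq_nil (le_refl 1)]
      rfl
  | succ t ih =>
    intro ht
    have htm : (t : Int) + 1 ≤ m := by push_cast at ht; omega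
    have ht' : (t : Int) ≤ m := by omega
    rw [passFold_succ, ih ht']
    have hc : ((t + 1 : Nat) : Int) = (t : Int) + 1 := by push_cast; ring
    have hi1 : (1 : Int) ≤ (t : Int) + 1 := by omega
    have hstknn : ∀ k ∈ stk1 cn m t, 0 ≤ k := by
      intro k hk; have := (mem_stk1.1 hk).1; omega
    by_cases hodd : isOddP cn ((t : Int) + 1) = true
    · -- odd position: stack is flushed into nt
      have hoddmem : ((t : Int) + 1) ∈ oddsL cn m := isOdd_mem_oddsL hi1 htm hodd
      rw [stepAt_odd _ hodd]
      refine Prod.ext ?_ ?_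
      · show popAll (nt1 cn m t) (stk1 cn m t) ((t : Int) + 1) = nt1 cn m (t + 1)
        apply List.ext_getElem (by rw [popAll_length, nt1_length, nt1_length])
        intro j hj hj'
        rw [popAll_length, nt1_length] at hj
        rw [popAll_getElem _ _ _ hstknn j (by rw [nt1_length]; exact hj)]
        rw [nt1_getElem cn m t j hj, nt1_getElem cn m (t + 1) j hj, hc,
          hasOddB_succ_odd hoddmem]
        by_cases hin : ((j : Nat) : Int) ∈ stk1 cn m t
        · rcases mem_stk1.1 hin with ⟨hj1, hj2, hj3, hj4⟩
          rw [if_pos hin, if_pos ⟨hj1, hj3, by simp [hj4]; omega⟩]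
          refine (nextOdd_eq hoddmem (by omega) ?_).symm
          intro o ho hlt
          by_contra hno
          have hom := (mem_oddsL.1 ho).2.1
          have : hasOddB cn m (j : Int) (t : Int) = true :=
            hasOddB_iff.2 ⟨o, ho, hlt, by omega⟩
          rw [hj4] at this; cases this
        · rw [if_neg hin]
          by_cases hc1 : 1 ≤ (j : Int) ∧ isEvP cn (j : Int) = true
          · by_cases hho : hasOddB cn m (j : Int) (t : Int) = true
            · rw [if_pos ⟨hc1.1, hc1.2, hho⟩, if_pos ⟨hc1.1, hc1.2, by simp [hho]⟩]
            · have hjt : ¬((j : Int) ≤ (t : Int)) := by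
                intro hle
                exact hin (mem_stk1.2 ⟨hc1.1, hle, hc1.2, Bool.eq_false_iff.2 hho⟩)
              rw [if_neg (by rintro ⟨-, -, hcc⟩; exact hho hcc),
                if_neg (by
                  rintro ⟨-, -, hcc⟩
                  rcases Bool.or_eq_true_iff.1 hcc with h | h
                  · exact hho h
                  · simp at h; omega)]
          · rw [if_neg (by rintro ⟨a1, a2, -⟩; exact hc1 ⟨a1, a2⟩),
              if_neg (by rintro ⟨a1, a2, -⟩; exact hc1 ⟨a1, a2⟩)]
      · show ([] : List Int) = stk1 cn m (t + 1)
        have hev' : isEvP cn ((t : Int) + 1) = false := by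
          unfold isEvP
          rw [hodd]
          rfl
        have hfe : ((PySem.List.pyRange 1 ((t : Int) + 1) 1).filter
            (fun i => isEvP cn i && !hasOddB cn m i ((t : Int) + 1))) = [] := by
          rw [List.filter_eq_nil_iff]
          intro o ho
          rcases PySem.List.mem_pyRange_one.1 ho with ⟨ho1, ho2⟩
          simp only [Bool.and_eq_true, Bool.not_eq_eq_eq_not, Bool.not_true, not_and]
          intro _
          rw [hasOddB_succ_odd hoddmem]
          simp
          omega
        rw [stk1_succ, hev', hfe]
        rfl
    · -- not odd
      have hoddmem : ((t : Int) + 1) ∉ oddsL cn m := by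
        intro hmem
        exact hodd (mem_oddsL.1 hmem).2.2
      have hnew : hasOddB cn m ((t : Int) + 1) (t : Int) = false := by
        rw [Bool.eq_false_iff]
        intro hcc
        rcases hasOddB_iff.1 hcc with ⟨o, ho, a1, a2⟩
        omega
      have hnt1same : nt1 cn m (t + 1) = nt1 cn m t := by
        unfold nt1
        apply List.map_congr_left
        intro k _
        rw [hc, hasOddB_succ_notodd hoddmem]
      have hentry : PySem.List.pyGetD (nt1 cn m t) ((t : Int) + 1) 0
          = if isEvP cn ((t : Int) + 1) = true then 0 else 0 := by
        rw [nt1_pyGetD cn m t (by omega) (by omega)]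
        rw [if_neg (by rintro ⟨-, -, hcc⟩; rw [hnew] at hcc; cases hcc)]
        split <;> rfl
      have hentry0 : PySem.List.pyGetD (nt1 cn m t) ((t : Int) + 1) 0 = 0 := by
        rw [hentry]; split <;> rfl
      by_cases hcz : PySem.List.pyGetD cn ((t : Int) + 1) 0 = 0
      · -- count zero: nothing happens
        rw [stepAt_skip _ (Bool.eq_false_iff.2 hodd) (Or.inl hcz)]
        refine Prod.ext ?_ ?_
        · exact hnt1same.symm
        · show stk1 cn m t = stk1 cn m (t + 1)
          have hfc : ((PySem.List.pyRange 1 ((t : Int) + 1) 1).filter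
              (fun i => isEvP cn i && !hasOddB cn m i ((t : Int) + 1))) =
              (PySem.List.pyRange 1 ((t : Int) + 1) 1).filter
              (fun i => isEvP cn i && !hasOddB cn m i (t : Int)) := by
            apply List.filter_congr
            intro o _
            rw [hasOddB_succ_notodd hoddmem]
          have hev : isEvP cn ((t : Int) + 1) = false := by
            unfold isEvP
            simp [hcz]
          rw [stk1_succ, hfc, hev]
          rfl
      · -- even nonzero count: pushed on the stack
        rw [stepAt_ev _ (Bool.eq_false_iff.2 hodd) hcz hentry0]
        refine Prod.ext ?_ ?_
        · exact hnt1same.symm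
        · show ((t : Int) + 1) :: stk1 cn m t = stk1 cn m (t + 1)
          have hfc : ((PySem.List.pyRange 1 ((t : Int) + 1) 1).filter
              (fun i => isEvP cn i && !hasOddB cn m i ((t : Int) + 1))) =
              (PySem.List.pyRange 1 ((t : Int) + 1) 1).filter
              (fun i => isEvP cn i && !hasOddB cn m i (t : Int)) := by
            apply List.filter_congr
            intro o _
            rw [hasOddB_succ_notodd hoddmem]
          have hev : isEvP cn ((t : Int) + 1) = true := by
            unfold isEvP
            rw [Bool.eq_false_iff.2 hodd]
            simp [hcz]
          have hnew' : hasOddB cn m ((t : Int) + 1) ((t : Int) + 1) = false := by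
            rw [hasOddB_succ_notodd hoddmem]
            exact hnew
          rw [stk1_succ, hfc, hev, hnew']
          rfl

-- ---------- phase 2 ----------

lemma phase2_noodd (cn : List Int) (m : Int) (h : oddsL cn m = []) (s : List Int × List Int) :
    ∀ t : Nat, (t : Int) ≤ m → (passFold cn t s).1 = s.1 := by
  intro t
  induction t with
  | zero => intro _; rfl
  | succ t ih =>
    intro ht
    have htm : (t : Int) + 1 ≤ m := by push_cast at ht; omega
    have hodd : isOddP cn ((t : Int) + 1) = false := by
      apply not_isOddP_of_not_mem (by omega) htm
      rw [h]
      exact List.not_mem_nil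
    rw [passFold_succ]
    unfold stepAt
    rw [if_neg (by unfold isOddP at hodd; simp [hodd])]
    split
    · exact ih (by omega)
    · exact ih (by omega)

lemma phase2_odd (cn : List Int) (m : Int) (hm : 0 < m) (hne : oddsL cn m ≠ []) :
    passFold cn m.toNat (nt1 cn m m.toNat, stk1 cn m m.toNat) = (ntF cn m, []) := by
  have ho1mem : (oddsL cn m).headD 0 ∈ oddsL cn m := headD_mem hne
  have ho11 : 1 ≤ (oddsL cn m).headD 0 := (mem_oddsL.1 ho1mem).1
  have ho1m : (oddsL cn m).headD 0 ≤ m := (mem_oddsL.1 ho1mem).2.1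
  have hMm : ((m.toNat : Nat) : Int) = m := by omega
  have main : ∀ t : Nat, (t : Int) ≤ m →
      passFold cn t (nt1 cn m m.toNat, stk1 cn m m.toNat)
        = if (t : Int) < (oddsL cn m).headD 0 then (nt1 cn m m.toNat, stk1 cn m m.toNat)
          else (ntF cn m, []) := by
    intro t
    induction t with
    | zero =>
      intro _
      rw [if_pos (by push_cast; omega)]
      rfl
    | succ t ih =>
      intro ht
      have htm : (t : Int) + 1 ≤ m := by push_cast at ht; omega
      have hc : ((t + 1 : Nat) : Int) = (t : Int) + 1 := by push_cast; ring
      rw [passFold_succ, ih (by omega)]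
      by_cases h1 : (t : Int) + 1 < (oddsL cn m).headD 0
      · -- still before the first odd position: nothing changes
        rw [if_pos (by omega), if_pos (by rw [hc]; omega)]
        have hodd : isOddP cn ((t : Int) + 1) = false := by
          apply not_isOddP_of_not_mem (by omega) htm
          intro hmem
          have := headD_min hmem
          omega
        by_cases hcz : PySem.List.pyGetD cn ((t : Int) + 1) 0 = 0
        · exact stepAt_skip _ hodd (Or.inl hcz)
        · apply stepAt_skip _ hodd
          right
          rw [nt1_pyGetD cn m m.toNat (by omega) (by omega)]
          have hev : isEvP cn ((t : Int) + 1) = true := by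
            unfold isEvP
            rw [hodd]
            simp [hcz]
          have hho : hasOddB cn m ((t : Int) + 1) ((m.toNat : Nat) : Int) = true := by
            apply hasOddB_iff.2
            exact ⟨(oddsL cn m).headD 0, ho1mem, by omega, by omega⟩
          rw [if_pos ⟨by omega, hev, hho⟩]
          have := nextOdd_pos hne ((t : Int) + 1)
          omega
      · by_cases h0 : (t : Int) < (oddsL cn m).headD 0
        · -- i is exactly the first odd position: the stack is flushed, nt becomes ntF
          have he : (t : Int) + 1 = (oddsL cn m).headD 0 := by omega
          rw [if_pos h0, if_neg (by rw [hc]; omega)]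
          have hodd : isOddP cn ((t : Int) + 1) = true := by
            rw [he]; exact (mem_oddsL.1 ho1mem).2.2
          rw [stepAt_odd _ hodd]
          refine Prod.ext ?_ ?_
          · show popAll (nt1 cn m m.toNat) (stk1 cn m m.toNat) ((t : Int) + 1) = ntF cn m
            have hlen : ((m + 1).toNat) = m.toNat + 1 := by omega
            apply List.ext_getElem
              (by rw [popAll_length, nt1_length, ntF_length, hlen])
            intro j hj hj'
            rw [popAll_length, nt1_length] at hj
            rw [popAll_getElem _ _ _ (fun k hk => by have := (mem_stk1.1 hk).1; omega) j
              (by rw [nt1_length]; exact hj)]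
            rw [ntF_getElem cn m j (by omega), nt1_getElem cn m m.toNat j hj]
            unfold ntFspec
            by_cases hin : ((j : Nat) : Int) ∈ stk1 cn m m.toNat
            · rcases mem_stk1.1 hin with ⟨hj1, hj2, hj3, hj4⟩
              rw [if_pos hin, if_pos ⟨hj1, hj3, hne⟩, he]
              refine (nextOdd_wrap ?_).symm
              intro o ho hlt
              have hom := (mem_oddsL.1 ho).2.1
              have : hasOddB cn m (j : Int) ((m.toNat : Nat) : Int) = true :=
                hasOddB_iff.2 ⟨o, ho, hlt, by omega⟩
              rw [hj4] at this
              cases this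
            · rw [if_neg hin]
              by_cases hc1 : 1 ≤ (j : Int) ∧ isEvP cn (j : Int) = true
              · by_cases hho : hasOddB cn m (j : Int) ((m.toNat : Nat) : Int) = true
                · rw [if_pos ⟨hc1.1, hc1.2, hho⟩, if_pos ⟨hc1.1, hc1.2, hne⟩]
                · exact absurd (mem_stk1.2 ⟨hc1.1, by omega, hc1.2, Bool.eq_false_iff.2 hho⟩) hin
              · rw [if_neg (by rintro ⟨a1, a2, -⟩; exact hc1 ⟨a1, a2⟩),
                  if_neg (by rintro ⟨a1, a2, -⟩; exact hc1 ⟨a1, a2⟩)]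
          · rfl
        · -- past the first odd position: the state is already final
          rw [if_neg h0, if_neg (by rw [hc]; omega)]
          by_cases hodd : isOddP cn ((t : Int) + 1) = true
          · rw [stepAt_odd _ hodd]
            rfl
          · apply stepAt_skip _ (Bool.eq_false_iff.2 hodd)
            by_cases hcz : PySem.List.pyGetD cn ((t : Int) + 1) 0 = 0
            · exact Or.inl hcz
            · right
              rw [ntF_pyGetD cn m (by omega) (by omega)]
              have hev : isEvP cn ((t : Int) + 1) = true := by
                unfold isEvP
                rw [Bool.eq_false_iff.2 hodd]
                simp [hcz]
              unfold ntFspec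
              rw [if_pos ⟨by omega, hev, hne⟩]
              have := nextOdd_pos hne ((t : Int) + 1)
              omega
      
  have := main m.toNat (by omega)
  rw [if_neg (by omega)] at this
  exact this

-- ---------- the two characterizations ----------

lemma shift_one (m : Int) : m <<< (1 : Nat) = 2 * m := by
  simp [Int.shiftLeft_eq]
  ring

lemma ntF_zeros (cn : List Int) (m : Int) (h : oddsL cn m = []) :
    ntF cn m = List.replicate (m + 1).toNat 0 := by
  unfold ntF
  apply zeros_map_range
  intro k _
  unfold ntFspec
  rw [if_neg (by rintro ⟨-, -, hc⟩; exact hc h)]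

lemma oddsL_nil_of_nonpos {cn : List Int} {m : Int} (hm : m ≤ 0) : oddsL cn m = [] := by
  unfold oddsL
  rw [PySem.List.pyRange_one_eq_nil (by omega)]
  rfl

lemma ntA_bridge (cn : List Int) (m : Int) (hm : 0 < m) :
    ntA cn m = (passFold cn m.toNat (passFold cn m.toNat
      (List.replicate (m.toNat + 1) 0, []))).1 := by
  unfold ntA
  rw [shift_one, PySem.List.pyRange_one_append 0 m (2 * m) (by omega) (by omega),
    List.foldl_append]
  rw [PySem.List.pyRange_one 0 m, PySem.List.pyRange_one m (2 * m)]
  rw [show (m - 0).toNat = m.toNat from by omega, show (2 * m - m).toNat = m.toNat from by omega]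
  rw [List.foldl_map, List.foldl_map]
  have hinit : (List.replicate (m + 1).toNat (0 : Int), ([] : List Int))
      = (List.replicate (m.toNat + 1) (0 : Int), ([] : List Int)) := by
    rw [show (m + 1).toNat = m.toNat + 1 from by omega]
  rw [hinit]
  have h1 : ∀ (s : List Int × List Int), ∀ k ∈ List.range m.toNat,
      (fun (s : List Int × List Int) (k : Nat) =>
        (fun (s : List Int × List Int) (j : Int) =>
          let i := PySem.Int.mod j m + 1
          if PySem.Int.band (PySem.List.pyGetD cn i 0) 1 == 1 then (popAll s.1 s.2 i, [])
          else if PySem.List.pyGetD cn i 0 != 0 && PySem.List.pyGetD s.1 i 0 == 0 then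
            (s.1, i :: s.2)
          else s) s (0 + (k : Int))) s k
      = stepAt cn s ((k : Int) + 1) := by
    intro s k hk
    have hk' : (k : Int) < m := by
      have := List.mem_range.1 hk
      omega
    have hmod : PySem.Int.mod (0 + (k : Int)) m = (k : Int) := by
      rw [zero_add, PySem.Int.mod_eq_emod_of_pos hm, Int.emod_eq_of_lt (by omega) hk']
    simp only [hmod]
    rfl
  have h2 : ∀ (s : List Int × List Int), ∀ k ∈ List.range m.toNat,
      (fun (s : List Int × List Int) (k : Nat) =>
        (fun (s : List Int × List Int) (j : Int) =>
          let i := PySem.Int.mod j m + 1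
          if PySem.Int.band (PySem.List.pyGetD cn i 0) 1 == 1 then (popAll s.1 s.2 i, [])
          else if PySem.List.pyGetD cn i 0 != 0 && PySem.List.pyGetD s.1 i 0 == 0 then
            (s.1, i :: s.2)
          else s) s (m + (k : Int))) s k
      = stepAt cn s ((k : Int) + 1) := by
    intro s k hk
    have hk' : (k : Int) < m := by
      have := List.mem_range.1 hk
      omega
    have hmod : PySem.Int.mod (m + (k : Int)) m = (k : Int) := by
      rw [PySem.Int.mod_eq_emod_of_pos hm, show m + (k : Int) = (k : Int) + m * 1 from by ring,
        Int.add_mul_emod_self_left, Int.emod_eq_of_lt (by omega) hk']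
    simp only [hmod]
    rfl
  rw [PySem.List.foldl_congr_mem _ _ _ _ h1, PySem.List.foldl_congr_mem _ _ _ _ h2]
  rfl

lemma ntA_eq_ntF (cn : List Int) (m : Int) : ntA cn m = ntF cn m := by
  by_cases hm : 0 < m
  · rw [ntA_bridge cn m hm]
    by_cases hne : oddsL cn m = []
    · rw [phase2_noodd cn m hne _ m.toNat (by omega),
        phase2_noodd cn m hne _ m.toNat (by omega)]
      rw [ntF_zeros cn m hne, show (m + 1).toNat = m.toNat + 1 from by omega]
    · rw [phase1 cn m hm m.toNat (by omega), phase2_odd cn m hm hne]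
  · unfold ntA
    rw [shift_one, PySem.List.pyRange_one_eq_nil (by omega)]
    rw [ntF_zeros cn m (oddsL_nil_of_nonpos (by omega))]
    rfl

def bstepAt (cn : List Int) (s : List Int × Int) (i : Int) : List Int × Int :=
  if PySem.Int.band (PySem.List.pyGetD cn i 0) 1 == 1 then (s.1, i)
  else if PySem.List.pyGetD cn i 0 != 0 then (PySem.List.pySetD s.1 i s.2, s.2)
  else s

def nt2 (cn : List Int) (m : Int) (d : Nat) : List Int :=
  (List.range (m.toNat + 1)).map (fun (k : Nat) =>
    if m - (d : Int) < (k : Int) ∧ isEvP cn (k : Int) = true then nextOdd cn m (k : Int) else 0)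

lemma bstepAt_odd {cn : List Int} {i : Int} (s : List Int × Int) (h : isOddP cn i = true) :
    bstepAt cn s i = (s.1, i) := by
  unfold bstepAt
  unfold isOddP at h
  rw [if_pos h]

lemma bstepAt_ev {cn : List Int} {i : Int} (s : List Int × Int) (h : isOddP cn i = false)
    (h2 : PySem.List.pyGetD cn i 0 ≠ 0) :
    bstepAt cn s i = (PySem.List.pySetD s.1 i s.2, s.2) := by
  unfold bstepAt
  unfold isOddP at h
  rw [if_neg (by simp [h]), if_pos (by simp [h2])]

lemma bstepAt_skip {cn : List Int} {i : Int} (s : List Int × Int) (h : isOddP cn i = false)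
    (h2 : PySem.List.pyGetD cn i 0 = 0) :
    bstepAt cn s i = s := by
  unfold bstepAt
  unfold isOddP at h
  rw [if_neg (by simp [h]), if_neg (by simp [h2])]

lemma phaseB (cn : List Int) (m : Int) (hm : 0 < m) :
    ∀ d : Nat, (d : Int) ≤ m →
      (List.range d).foldl (fun s (k : Nat) => bstepAt cn s (m - (k : Int)))
        (List.replicate (m.toNat + 1) 0, (oddsL cn m).headD 0)
      = (nt2 cn m d, nextOdd cn m (m - (d : Int))) := by
  intro d
  induction d with
  | zero =>
    intro _
    simp only [List.range_zero, List.foldl_nil]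
    refine Prod.ext ?_ ?_
    · show List.replicate (m.toNat + 1) (0 : Int) = nt2 cn m 0
      unfold nt2
      refine (zeros_map_range _ _ ?_).symm
      intro k hk
      rw [if_neg]
      rintro ⟨hc, -⟩
      have : (k : Int) ≤ (m.toNat : Int) := by omega
      omega
    · show (oddsL cn m).headD 0 = nextOdd cn m (m - ((0 : Nat) : Int))
      refine (nextOdd_wrap ?_).symm
      intro o ho
      have := (mem_oddsL.1 ho).2.1
      push_cast
      omega
  | succ d ih =>
    intro hd
    have hdm : (d : Int) + 1 ≤ m := by push_cast at hd; omega
    have hc : ((d + 1 : Nat) : Int) = (d : Int) + 1 := by push_cast; ring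
    rw [List.range_succ, List.foldl_append, ih (by omega)]
    simp only [List.foldl_cons, List.foldl_nil]
    have hi1 : 1 ≤ m - (d : Int) := by omega
    have him : m - (d : Int) ≤ m := by omega
    have hnext : m - ((d + 1 : Nat) : Int) = (m - (d : Int)) - 1 := by rw [hc]; ring
    by_cases hodd : isOddP cn (m - (d : Int)) = true
    · have hoddmem : (m - (d : Int)) ∈ oddsL cn m := isOdd_mem_oddsL hi1 him hodd
      rw [bstepAt_odd _ hodd]
      refine Prod.ext ?_ ?_
      · show nt2 cn m d = nt2 cn m (d + 1)
        unfold nt2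
        apply List.map_congr_left
        intro k _
        rw [hc]
        by_cases hk : (k : Int) = m - (d : Int)
        · have hev : isEvP cn (k : Int) = false := by
            unfold isEvP
            rw [hk, hodd]
            rfl
          rw [if_neg (by rintro ⟨-, h2⟩; rw [hev] at h2; cases h2),
            if_neg (by rintro ⟨-, h2⟩; rw [hev] at h2; cases h2)]
        · by_cases hgt : m - (d : Int) < (k : Int)
          · have h1 : m - ((d : Int) + 1) < (k : Int) := by omega
            by_cases hev : isEvP cn (k : Int) = true
            · rw [if_pos ⟨hgt, hev⟩, if_pos ⟨h1, hev⟩]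
            · rw [if_neg (by rintro ⟨-, h2⟩; exact hev h2),
                if_neg (by rintro ⟨-, h2⟩; exact hev h2)]
          · rw [if_neg (by rintro ⟨h1, -⟩; exact hgt h1),
              if_neg (by rintro ⟨h1, -⟩; omega)]
      · show m - (d : Int) = nextOdd cn m (m - ((d + 1 : Nat) : Int))
        rw [hnext]
        refine (nextOdd_eq hoddmem (by omega) ?_).symm
        intro o ho hlt
        omega
    · have hoddnm : (m - (d : Int)) ∉ oddsL cn m := by
        intro hmem
        exact hodd (mem_oddsL.1 hmem).2.2
      have hnx : nextOdd cn m (m - ((d + 1 : Nat) : Int)) = nextOdd cn m (m - (d : Int)) := by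
        rw [hnext, show (m - (d : Int)) - 1 = (m - (d : Int)) - 1 from rfl]
        exact nextOdd_pred hoddnm
      by_cases hcz : PySem.List.pyGetD cn (m - (d : Int)) 0 = 0
      · rw [bstepAt_skip _ (Bool.eq_false_iff.2 hodd) hcz]
        refine Prod.ext ?_ ?_
        · show nt2 cn m d = nt2 cn m (d + 1)
          unfold nt2
          apply List.map_congr_left
          intro k _
          rw [hc]
          have hev : isEvP cn (k : Int) = true → (k : Int) ≠ m - (d : Int) := by
            intro h hk
            unfold isEvP at h
            rw [hk, hcz] at h
            simp at h
          by_cases hev' : isEvP cn (k : Int) = true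
          · have := hev hev'
            by_cases hgt : m - (d : Int) < (k : Int)
            · rw [if_pos ⟨hgt, hev'⟩, if_pos ⟨by omega, hev'⟩]
            · rw [if_neg (by rintro ⟨h1, -⟩; exact hgt h1),
                if_neg (by rintro ⟨h1, -⟩; omega)]
          · rw [if_neg (by rintro ⟨-, h2⟩; exact hev' h2),
              if_neg (by rintro ⟨-, h2⟩; exact hev' h2)]
        · exact hnx.symm
      · have hev : isEvP cn (m - (d : Int)) = true := by
          unfold isEvP
          rw [Bool.eq_false_iff.2 hodd]
          simp [hcz]
        rw [bstepAt_ev _ (Bool.eq_false_iff.2 hodd) hcz]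
        refine Prod.ext ?_ ?_
        · show PySem.List.pySetD (nt2 cn m d) (m - (d : Int)) (nextOdd cn m (m - (d : Int)))
            = nt2 cn m (d + 1)
          unfold nt2
          rw [pySetD_map_range _ _ (by omega)]
          apply List.map_congr_left
          intro k _
          rw [hc]
          by_cases hk : (k : Int) = m - (d : Int)
          · rw [if_pos hk, if_pos ⟨by omega, by rw [hk]; exact hev⟩, hk]
          · rw [if_neg hk]
            by_cases hgt : m - (d : Int) < (k : Int)
            · by_cases hev' : isEvP cn (k : Int) = true
              · rw [if_pos ⟨hgt, hev'⟩, if_pos ⟨by omega, hev'⟩]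
              · rw [if_neg (by rintro ⟨-, h2⟩; exact hev' h2),
                  if_neg (by rintro ⟨-, h2⟩; exact hev' h2)]
            · rw [if_neg (by rintro ⟨h1, -⟩; exact hgt h1),
                if_neg (by rintro ⟨h1, -⟩; omega)]
        · exact hnx.symm

lemma ntB_eq_ntF (cn : List Int) (m : Int) : ntB cn m = ntF cn m := by
  by_cases hne : oddsL cn m = []
  · unfold ntB
    rw [if_pos (by rw [hne]; rfl), ntF_zeros cn m hne]
  · have hm : 0 < m := by
      rcases List.exists_cons_of_ne_nil hne with ⟨h, t, he⟩
      have : h ∈ oddsL cn m := by rw [he]; exact List.mem_cons_self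
      have := mem_oddsL.1 this
      omega
    unfold ntB
    rw [if_neg (by simp [List.isEmpty_iff, hne])]
    rw [PySem.List.pyRange_neg_one m 0, show (m - 0).toNat = m.toNat from by omega,
      List.foldl_map]
    have hh : PySem.List.pyGetD (oddsL cn m) 0 0 = (oddsL cn m).headD 0 := by
      rcases List.exists_cons_of_ne_nil hne with ⟨h, t, he⟩
      rw [he, PySem.List.pyGetD_zero_cons]
      rfl
    have hinit : (List.replicate (m + 1).toNat (0 : Int), PySem.List.pyGetD (oddsL cn m) 0 0)
        = (List.replicate (m.toNat + 1) (0 : Int), (oddsL cn m).headD 0) := by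
      rw [show (m + 1).toNat = m.toNat + 1 from by omega, hh]
    rw [hinit]
    have hstep : ∀ (s : List Int × Int), ∀ k ∈ List.range m.toNat,
        (fun (s : List Int × Int) (k : Nat) =>
          (fun (s : List Int × Int) (i : Int) =>
            if PySem.Int.band (PySem.List.pyGetD cn i 0) 1 == 1 then (s.1, i)
            else if PySem.List.pyGetD cn i 0 != 0 then (PySem.List.pySetD s.1 i s.2, s.2)
            else s) s (m - (k : Int))) s k
        = bstepAt cn s (m - (k : Int)) := by
      intro s k _
      rfl
    rw [PySem.List.foldl_congr_mem _ _ _ _ hstep]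
    rw [phaseB cn m hm m.toNat (by omega)]
    show nt2 cn m m.toNat = ntF cn m
    unfold nt2 ntF
    rw [show (m + 1).toNat = m.toNat + 1 from by omega]
    apply List.map_congr_left
    intro k _
    unfold ntFspec
    have hz : m - ((m.toNat : Nat) : Int) = 0 := by omega
    rw [hz]
    by_cases hev : isEvP cn (k : Int) = true
    · by_cases hk : 1 ≤ (k : Int)
      · rw [if_pos ⟨by omega, hev⟩, if_pos ⟨hk, hev, hne⟩]
      · rw [if_neg (by rintro ⟨h1, -⟩; omega), if_neg (by rintro ⟨h1, -, -⟩; omega)]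
    · rw [if_neg (by rintro ⟨-, h2⟩; exact hev h2), if_neg (by rintro ⟨-, h2, -⟩; exact hev h2)]

lemma ntF_nonneg (cn : List Int) (m : Int) : ∀ v ∈ ntF cn m, 0 ≤ v := by
  intro v hv
  simp only [ntF, List.mem_map] at hv
  rcases hv with ⟨k, _, rfl⟩
  unfold ntFspec
  split
  · next h => exact le_trans (by omega) (nextOdd_pos h.2.2 _)
  · omega

-- ---------- query phase ----------

lemma pyGetD_nonneg {nt : List Int} (h : ∀ v ∈ nt, 0 ≤ v) (x : Int) :
    0 ≤ PySem.List.pyGetD nt x 0 := by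
  by_cases hr : PySem.Raise.InRange nt.length x
  · exact h _ (PySem.List.pyGetD_mem _ _ hr)
  · rw [PySem.List.pyGetD_of_none]
    exact (PySem.List.pyGet?_eq_none_iff _ _).2 hr

lemma qfold_eq (m : Int) (a cn nt : List Int) (qa : List Int)
    (hnn : ∀ v ∈ nt, 0 ≤ v) :
    qa.foldl (fun (s : Int × List Int) r =>
      if r < 0 then (s.1 + 1, s.2)
      else
        let x := PySem.List.pyGetD a r 0
        if PySem.Int.band (PySem.List.pyGetD cn x 0) 1 == 1 then (s.1, s.2 ++ [x])
        else
          let ntx := PySem.List.pyGetD nt x 0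
          let stop := if 0 < ntx then decide (PySem.Int.mod (ntx - x) m ≤ s.1) else false
          if stop then (s.1, s.2 ++ [ntx])
          else (s.1, s.2 ++ [PySem.Int.mod (x - 1 + s.1) m + 1])) ((0 : Int), ([] : List Int))
    = qa.foldl (fun (s : Int × List Int) r =>
      if r < 0 then (s.1 + 1, s.2)
      else (s.1, s.2 ++ [answerB cn nt m (PySem.List.pyGetD a r 0) s.1]))
      ((0 : Int), ([] : List Int)) := by
  apply PySem.List.foldl_congr_mem
  intro s r hr_mem
  by_cases hr : r < 0
  · simp [hr]
  · simp only [if_neg hr]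
    set x := PySem.List.pyGetD a r 0 with hx
    unfold answerB
    by_cases hodd : PySem.Int.band (PySem.List.pyGetD cn x 0) 1 == 1
    · simp [hodd]
    · simp only [hodd, Bool.false_eq_true]
      have hnt : 0 ≤ PySem.List.pyGetD nt x 0 := pyGetD_nonneg hnn x
      set ntx := PySem.List.pyGetD nt x 0 with hntx
      by_cases h0 : 0 < ntx
      · have : (ntx != 0) = true := by simp; omega
        simp only [if_pos h0, this, Bool.true_and]
        by_cases hle : PySem.Int.mod (ntx - x) m ≤ s.1
        · simp [hle]
        · simp [hle]
      · have he : ntx = 0 := by omega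
        simp [he]

-- ===== VERDICT (by name: the statement is the Claim_ definition above) =====
theorem solve_spec : Claim_equal_solve := by
  intro n m q a qa _ _
  unfold Spec_solve
  have hA : solve n m q a qa
      = (qa.foldl (fun (s : Int × List Int) r =>
          if r < 0 then (s.1 + 1, s.2)
          else
            let x := PySem.List.pyGetD a r 0
            if PySem.Int.band (PySem.List.pyGetD (cnF m a) x 0) 1 == 1 then (s.1, s.2 ++ [x])
            else
              let ntx := PySem.List.pyGetD (ntA (cnF m a) m) x 0
              let stop := if 0 < ntx then decide (PySem.Int.mod (ntx - x) m ≤ s.1) else false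
              if stop then (s.1, s.2 ++ [ntx])
              else (s.1, s.2 ++ [PySem.Int.mod (x - 1 + s.1) m + 1]))
          ((0 : Int), ([] : List Int))).2 := rfl
  have hB : solve_alt n m q a qa
      = (qa.foldl (fun (s : Int × List Int) r =>
          if r < 0 then (s.1 + 1, s.2)
          else (s.1, s.2 ++ [answerB (cnF m a) (ntB (cnF m a) m) m (PySem.List.pyGetD a r 0) s.1]))
          ((0 : Int), ([] : List Int))).2 := rfl
  rw [hA, hB, ntA_eq_ntF, ntB_eq_ntF]
  exact congrArg Prod.snd (qfold_eq m a (cnF m a) (ntF (cnF m a) m) qa (ntF_nonneg _ _))
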